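-- pv_equiv track=rewrite | github.com/FranciscoDiogo/Apriori-Algorithm-implementation | src/main.py | single_item_list
-- ===== SOURCE A (Python) =====
-- def single_item_list(data):
--     C1 = []
--     for transaction in data:
--         for item in transaction:
--             if not [item] in C1:
--                 C1.append([item])
--
--     C1.sort()
--     #return as frozenset so it can be used as dictionary keys
--     return list(map(frozenset, C1))
-- ===== SOURCE B (Python) =====
-- def single_item_list(data):
--     # flatten once, sort once, adjacent-dedup in one pass, then wrap
--     items = sorted(x for transaction in data for x in transaction)
--     uniq = []
--     for x in items:
--         if not uniq or uniq[-1] != x: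
--             uniq.append(x)
--     return [frozenset([x]) for x in uniq]
-- ===== Notes on version B (the rewrite author's own statement) =====
-- stated objective: faster
-- what changed: A scans its accumulator for every item (quadratic membership tests on list-of-lists) and sorts lists of lists; B flattens once, sorts the raw items once, removes duplicates in a single adjacent-comparison pass, and wraps at the end.
import Mathlib
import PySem

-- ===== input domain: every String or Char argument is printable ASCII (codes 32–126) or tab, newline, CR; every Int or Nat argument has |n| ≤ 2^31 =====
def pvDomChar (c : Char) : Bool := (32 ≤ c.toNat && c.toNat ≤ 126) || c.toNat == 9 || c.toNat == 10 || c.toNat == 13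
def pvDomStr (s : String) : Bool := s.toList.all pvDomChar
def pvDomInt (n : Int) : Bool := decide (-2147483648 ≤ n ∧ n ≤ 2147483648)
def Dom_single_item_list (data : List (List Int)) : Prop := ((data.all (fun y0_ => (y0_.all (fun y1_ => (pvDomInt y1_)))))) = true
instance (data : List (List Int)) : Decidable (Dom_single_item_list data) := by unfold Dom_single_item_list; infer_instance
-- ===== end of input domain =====

-- B flattens once, sorts the items once and removes duplicates in one adjacent pass,
-- instead of A's per-item linear membership scan into the accumulator; objective: faster.

-- ===== PORT A =====
def single_item_list (data : List (List Int)) : List (List Int) :=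
  let C1 : List (List Int) :=
    data.foldl (fun C1 transaction =>
      transaction.foldl (fun C1 item =>
        if [item] ∈ C1 then C1 else C1 ++ [[item]]) C1) []
  let C1 := PySem.List.sorted C1 (fun x => x) false
  -- frozenset of a singleton list is that singleton as a set (the same one-element list)
  C1.map (fun s => s)

-- ===== PORT B =====
def single_item_list_alt (data : List (List Int)) : List (List Int) :=
  let items := PySem.List.sorted (data.flatMap (fun transaction => transaction)) (fun x => x) false
  let uniq := items.foldl (fun uniq x =>
      if uniq = [] ∨ uniq.getLast? ≠ some x then uniq ++ [x] else uniq) []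
  uniq.map (fun x => [x])

-- ===== PRECONDITION & SPEC =====
def Spec_single_item_list (data : List (List Int)) (out : List (List Int)) : Prop := out = single_item_list_alt data
instance (data : List (List Int)) (out : List (List Int)) : Decidable (Spec_single_item_list data out) := by unfold Spec_single_item_list; infer_instance

-- ===== CLAIM (what is proved, stated in full; the proofs are below) =====
def Claim_equal_single_item_list : Prop := ∀ (data : List (List Int)), Dom_single_item_list data → Spec_single_item_list data (single_item_list data)

-- ===== LEMMAS AND PROOFS =====

-- A's inner accumulation over one transaction, on an accumulator of singletons, is Set.update of the underlying elements
theorem acc_inner (t : List Int) (s : List Int) :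
    t.foldl (fun C1 item => if [item] ∈ C1 then C1 else C1 ++ [[item]]) (s.map (fun x => [x]))
      = (PySem.Set.update s t).map (fun x => [x]) := by
  induction t generalizing s with
  | nil => rfl
  | cons x t ih =>
    simp only [List.foldl_cons, PySem.Set.update] at *
    by_cases hx : x ∈ s
    · have hmem : ([x] : List Int) ∈ s.map (fun x => [x]) := List.mem_map_of_mem hx
      rw [if_pos hmem,
        show PySem.Set.add s x = s from by simp [PySem.Set.add, PySem.Set.contains, hx]]
      exact ih s
    · have hnx : ([x] : List Int) ∉ s.map (fun x => [x]) := by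
        simp only [List.mem_map]
        rintro ⟨a, ha, hax⟩
        have : a = x := by simpa using hax
        exact hx (this ▸ ha)
      rw [if_neg hnx]
      have hadd : PySem.Set.add s x = s ++ [x] := by simp [PySem.Set.add, PySem.Set.contains, hx]
      have : s.map (fun x => [x]) ++ [[x]] = (PySem.Set.add s x).map (fun y => [y]) := by
        rw [hadd]; simp
      rw [this]
      exact ih _

-- A's whole accumulation is the set of the flattened items, as singletons
theorem acc_outer (data : List (List Int)) :
    data.foldl (fun C1 transaction =>
        transaction.foldl (fun C1 item => if [item] ∈ C1 then C1 else C1 ++ [[item]]) C1) []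
      = (PySem.Set.ofList (data.flatMap (fun t => t))).map (fun x => [x]) := by
  have key : ∀ (s : List Int),
      data.foldl (fun C1 transaction =>
        transaction.foldl (fun C1 item => if [item] ∈ C1 then C1 else C1 ++ [[item]]) C1)
        (s.map (fun x => [x]))
      = ((data.flatMap (fun t => t)).foldl PySem.Set.add s).map (fun x => [x]) := by
    induction data with
    | nil => intro s; rfl
    | cons t data ih =>
      intro s
      simp only [List.foldl_cons, List.flatMap_cons, List.foldl_append]
      rw [acc_inner t s]
      exact ih (PySem.Set.update s t)
  have := key []
  simpa [PySem.Set.ofList_eq_foldl] using this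

-- the adjacent-dedup fold of B: invariant
theorem dedup_fold_invariant (l : List Int) :
    ∀ (acc : List Int), l.Pairwise (· ≤ ·) → acc.Pairwise (· < ·) →
    (∀ a ∈ acc, ∀ b ∈ l, a ≤ b) →
    (let r := l.foldl (fun uniq x =>
        if uniq = [] ∨ uniq.getLast? ≠ some x then uniq ++ [x] else uniq) acc
     r.Pairwise (· < ·) ∧ (∀ x, x ∈ r ↔ x ∈ acc ∨ x ∈ l)) := by
  induction l with
  | nil => intro acc _ hacc _; exact ⟨hacc, by simp⟩
  | cons x l ih =>
    intro acc hl hacc hconn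
    simp only [List.foldl_cons]
    by_cases hlast : acc.getLast? = some x
    · have hxmem : x ∈ acc := List.mem_of_getLast? hlast
      have hcond : ¬ (acc = [] ∨ acc.getLast? ≠ some x) := by
        rintro (h | h)
        · simp [h] at hlast
        · exact h hlast
      rw [if_neg hcond]
      have ⟨h1, h2⟩ := ih acc (List.Pairwise.of_cons hl)
        hacc
        (fun a ha b hb => hconn a ha b (List.mem_cons_of_mem _ hb))
      refine ⟨h1, fun y => ?_⟩
      rw [h2 y]
      constructor
      · rintro (h | h)
        · exact Or.inl h
        · exact Or.inr (List.mem_cons_of_mem _ h)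
      · rintro (h | h)
        · exact Or.inl h
        · rcases List.mem_cons.mp h with rfl | h
          · exact Or.inl hxmem
          · exact Or.inr h
    · have hcond : acc = [] ∨ acc.getLast? ≠ some x := by
        rcases acc with _ | _
        · exact Or.inl rfl
        · exact Or.inr hlast
      rw [if_pos hcond]
      have hstrict : ∀ a ∈ acc, a < x := by
        intro a ha
        rcases acc.eq_nil_or_concat with rfl | ⟨ys, m, rfl⟩
        · simp at ha
        · simp only [List.concat_eq_append] at *
          have hm : (ys ++ [m]).getLast? = some m := by simp
          have hmx : m ≤ x := hconn m (by simp) x (List.mem_cons_self ..)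
          have hmnex : m ≠ x := fun h => hlast (h ▸ hm)
          have hmlt : m < x := lt_of_le_of_ne hmx hmnex
          rcases List.mem_append.mp ha with h | h
          · have : a < m := by
              have := (List.pairwise_append.mp hacc).2.2
              exact this a h m (by simp)
            exact lt_trans this hmlt
          · simp at h; exact h ▸ hmlt
      have hacc' : (acc ++ [x]).Pairwise (· < ·) := by
        rw [List.pairwise_append]
        exact ⟨hacc, List.pairwise_singleton _ _, fun a ha b hb => by simp at hb; exact hb ▸ hstrict a ha⟩
      have hconn' : ∀ a ∈ acc ++ [x], ∀ b ∈ l, a ≤ b := by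
        intro a ha b hb
        rcases List.mem_append.mp ha with h | h
        · exact hconn a h b (List.mem_cons_of_mem _ hb)
        · simp at h
          subst h
          exact (List.pairwise_cons.mp hl).1 b hb
      have ⟨h1, h2⟩ := ih (acc ++ [x]) (List.Pairwise.of_cons hl) hacc' hconn'
      refine ⟨h1, fun y => ?_⟩
      rw [h2 y]
      simp only [List.mem_append, List.mem_cons]
      tauto

-- B's uniq equals A's sorted set, as lists of Ints
theorem uniq_eq_sorted_set (xs : List Int) :
    (PySem.List.sorted xs (fun x => x) false).foldl (fun uniq x =>
        if uniq = [] ∨ uniq.getLast? ≠ some x then uniq ++ [x] else uniq) []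
      = PySem.List.sorted (PySem.Set.ofList xs) (fun x => x) false := by
  have hs : (PySem.List.sorted xs (fun x => x) false).Pairwise (· ≤ ·) := by
    simpa using PySem.List.sorted_pairwise (xs := xs) (key := fun x => x)
  have ⟨h1, h2⟩ := dedup_fold_invariant (PySem.List.sorted xs (fun x => x) false) [] hs
    (List.Pairwise.nil) (by simp)
  set r := (PySem.List.sorted xs (fun x => x) false).foldl (fun uniq x =>
      if uniq = [] ∨ uniq.getLast? ≠ some x then uniq ++ [x] else uniq) [] with hr
  have hmem : ∀ y, y ∈ r ↔ y ∈ xs := by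
    intro y
    rw [h2 y]
    simp [PySem.List.mem_sorted]
  have hperm : r.Perm (PySem.Set.ofList xs) := by
    apply (List.perm_ext_iff_of_nodup h1.nodup (PySem.Set.nodup_ofList xs)).mpr
    intro y
    rw [hmem y, PySem.Set.mem_ofList]
  have := PySem.List.sorted_eq_of_perm_of_pairwise_lt (PySem.Set.ofList xs) r (fun x => x) hperm (by simpa using h1)
  convert this.symm using 2

-- singletons: sorting the wrapped list is wrapping the sorted list
theorem sorted_map_singleton (s : List Int) (hs : s.Nodup) :
    PySem.List.sorted (s.map (fun x => ([x] : List Int))) (fun x => x) false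
      = (PySem.List.sorted s (fun x => x) false).map (fun x => [x]) := by
  have hperm : ((PySem.List.sorted s (fun x => x) false).map (fun x => ([x] : List Int))).Perm
      (s.map (fun x => ([x] : List Int))) := (PySem.List.sorted_perm s (fun x => x) false).map _
  have hpw : ((PySem.List.sorted s (fun x => x) false).map (fun x => ([x] : List Int))).Pairwise (· < ·) := by
    have h1 : (PySem.List.sorted s (fun x => x) false).Pairwise (· ≤ ·) := by
      simpa using PySem.List.sorted_pairwise (xs := s) (key := fun x => x)
    have hnd : (PySem.List.sorted s (fun x => x) false).Nodup :=
      ((PySem.List.sorted_perm s (fun x => x) false).nodup_iff).mpr hs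
    have hlt : (PySem.List.sorted s (fun x => x) false).Pairwise (· < ·) :=
      (List.pairwise_and_iff.mpr ⟨h1, hnd⟩).imp (fun h => lt_of_le_of_ne h.1 h.2)
    refine List.Pairwise.map _ ?_ hlt
    intro a b hab
    exact List.lt_iff_lex_lt _ _ |>.mpr (List.Lex.rel hab)
  have := PySem.List.sorted_eq_of_perm_of_pairwise_lt (s.map (fun x => ([x] : List Int)))
    ((PySem.List.sorted s (fun x => x) false).map (fun x => ([x] : List Int))) (fun x => x) hperm hpw
  convert this using 2

-- ===== VERDICT (by name: the statement is the Claim_ definition above) =====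
theorem single_item_list_spec : Claim_equal_single_item_list := by
  intro data _
  unfold Spec_single_item_list single_item_list single_item_list_alt
  simp only [acc_outer, uniq_eq_sorted_set, List.map_id']
  rw [sorted_map_singleton _ (PySem.Set.nodup_ofList _)]
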